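-- pv_equiv track=rewrite | github.com/hitnrun30/phase10randomizer | phase10probability.py | hand_counts
-- ===== SOURCE A (Python) =====
-- from collections import Counter, defaultdict
--
-- def hand_counts(hand):
--     nums_by_value = defaultdict(list)   # value -> list of (value,color)
--     color_counts = Counter()
--     wilds = 0
--     skips = 0
--     for t, v, c in hand:
--         if t == "num":
--             nums_by_value[v].append((v, c))
--             color_counts[c] += 1
--         elif t == "wild":
--             wilds += 1
--         else:
--             skips += 1
--     return nums_by_value, color_counts, wilds, skips
-- ===== SOURCE B (Python) =====
-- from collections import Counter, defaultdict
--
-- def hand_counts(hand):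
--     # Type-filtered passes instead of one loop with a three-way branch;
--     # skips obtained arithmetically from the partition of the hand.
--     nums = [(v, c) for t, v, c in hand if t == "num"]
--     nums_by_value = defaultdict(list)
--     for v, c in nums:
--         nums_by_value[v].append((v, c))
--     color_counts = Counter(c for _, c in nums)
--     wilds = sum(1 for t, _, _ in hand if t == "wild")
--     skips = len(hand) - len(nums) - wilds
--     return nums_by_value, color_counts, wilds, skips
-- ===== Notes on version B (the rewrite author's own statement) =====
-- stated objective: alternative
-- what changed: Replaces A's single loop with a three-way branch and four pieces of mutable state by type-filtered passes: a num-card filter feeding the grouping dict and a Counter(), a wild tally, and skips derived arithmetically as len(hand) - len(nums) - wilds.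
import Mathlib
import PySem

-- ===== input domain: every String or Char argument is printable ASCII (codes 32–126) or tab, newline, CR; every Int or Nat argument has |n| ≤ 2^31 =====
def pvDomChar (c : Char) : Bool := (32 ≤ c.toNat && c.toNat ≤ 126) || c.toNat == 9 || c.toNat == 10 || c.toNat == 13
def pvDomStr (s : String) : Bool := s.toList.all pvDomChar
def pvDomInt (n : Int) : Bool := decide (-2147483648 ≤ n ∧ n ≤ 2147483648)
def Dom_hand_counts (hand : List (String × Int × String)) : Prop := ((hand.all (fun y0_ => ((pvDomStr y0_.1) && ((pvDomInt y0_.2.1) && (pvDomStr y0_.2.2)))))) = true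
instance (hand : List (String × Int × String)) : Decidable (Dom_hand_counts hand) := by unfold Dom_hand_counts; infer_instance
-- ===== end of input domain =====

-- B replaces A's single three-way-branch loop by type-filtered passes (group/count over
-- the filtered num cards, a wild tally, and skips by arithmetic); objective: alternative decomposition.

-- ===== PORT A =====
-- A's loop state: (nums_by_value, color_counts, wilds, skips)
def pvStateA := PySem.Dict Int (List (Int × String)) × PySem.Dict String Int × Int × Int

-- the body of A's for-loop, one card at a time
def pvStepA (st : pvStateA) (x : String × Int × String) : pvStateA :=
  if x.1 == "num" then
    (st.1.modify x.2.1 [] (· ++ [(x.2.1, x.2.2)]), st.2.1.modify x.2.2 0 (· + 1), st.2.2.1, st.2.2.2)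
  else if x.1 == "wild" then (st.1, st.2.1, st.2.2.1 + 1, st.2.2.2)
  else (st.1, st.2.1, st.2.2.1, st.2.2.2 + 1)

def hand_counts (hand : List (String × Int × String)) : (List (Int × List (Int × String))) × (List (String × Int)) × Int × Int :=
  let st := hand.foldl pvStepA (PySem.Dict.empty, PySem.Dict.empty, 0, 0)
  (st.1.items, st.2.1.items, st.2.2.1, st.2.2.2)

-- ===== PORT B =====
-- nums_by_value[v].append((v,c)) for one num card
def pvGroupStep (d : PySem.Dict Int (List (Int × String))) (p : Int × String) : PySem.Dict Int (List (Int × String)) :=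
  d.modify p.1 [] (· ++ [p])

-- one step of sum(1 for t,_,_ in hand if t == "wild")
def pvWildStep (a : Int) (x : String × Int × String) : Int :=
  if x.1 == "wild" then a + 1 else a

-- the num cards of the hand, as (value, color) pairs
def pvNums (hand : List (String × Int × String)) : List (Int × String) :=
  hand.filterMap (fun x => if x.1 == "num" then some (x.2.1, x.2.2) else none)

def hand_counts_alt (hand : List (String × Int × String)) : (List (Int × List (Int × String))) × (List (String × Int)) × Int × Int :=
  let nums := pvNums hand
  let nbv := nums.foldl pvGroupStep PySem.Dict.empty
  let cc := PySem.Dict.counter (nums.map (·.2))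
  let wilds := hand.foldl pvWildStep 0
  let skips := (hand.length : Int) - nums.length - wilds
  (nbv.items, cc.items, wilds, skips)

-- ===== PRECONDITION & SPEC =====
def Spec_hand_counts (hand : List (String × Int × String)) (out : (List (Int × List (Int × String))) × (List (String × Int)) × Int × Int) : Prop := out = hand_counts_alt hand
instance (hand : List (String × Int × String)) (out : (List (Int × List (Int × String))) × (List (String × Int)) × Int × Int) : Decidable (Spec_hand_counts hand out) := by unfold Spec_hand_counts; infer_instance

-- ===== CLAIM (what is proved, stated in full; the proofs are below) =====
def Claim_equal_hand_counts : Prop := ∀ (hand : List (String × Int × String)), Dom_hand_counts hand → Spec_hand_counts hand (hand_counts hand)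

-- ===== LEMMAS AND PROOFS =====

-- A's fold, from an arbitrary state, expressed through B's filtered passes.
theorem hand_counts_fold (hand : List (String × Int × String))
    (n : PySem.Dict Int (List (Int × String))) (cc : PySem.Dict String Int) (w s : Int) :
    hand.foldl pvStepA (n, cc, w, s)
    = ((pvNums hand).foldl pvGroupStep n,
       ((pvNums hand).map (·.2)).foldl (fun (d : PySem.Dict String Int) c => d.modify c 0 (· + 1)) cc,
       w + (hand.countP (fun x => x.1 == "wild") : Int),
       s + (hand.countP (fun x => !(x.1 == "num") && !(x.1 == "wild")) : Int)) := by
  induction hand generalizing n cc w s with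
  | nil => simp [pvNums]
  | cons x xs ih =>
    obtain ⟨t, v, c⟩ := x
    by_cases ht : t = "num"
    · subst ht
      rw [List.foldl_cons, show pvStepA (n, cc, w, s) ("num", v, c)
            = (pvGroupStep n (v, c), cc.modify c 0 (· + 1), w, s) by
          simp [pvStepA, pvGroupStep], ih]
      simp [pvNums]
    · by_cases hw : t = "wild"
      · subst hw
        rw [List.foldl_cons, show pvStepA (n, cc, w, s) ("wild", v, c) = (n, cc, w + 1, s) by
            simp [pvStepA], ih]
        simp [pvNums]
        ring_nf
      · rw [List.foldl_cons, show pvStepA (n, cc, w, s) (t, v, c) = (n, cc, w, s + 1) by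
            simp [pvStepA, ht, hw], ih]
        simp [pvNums, ht, hw]
        ring_nf

-- every card is a num, a wild or a skip: skips = length - nums - wilds
theorem countP_partition (hand : List (String × Int × String)) :
    (hand.countP (fun x => !(x.1 == "num") && !(x.1 == "wild")) : Int)
    = (hand.length : Int) - (pvNums hand).length - (hand.countP (fun x => x.1 == "wild") : Int) := by
  induction hand with
  | nil => simp [pvNums]
  | cons x xs ih =>
    obtain ⟨t, v, c⟩ := x
    by_cases ht : t = "num"
    · subst ht; simp [pvNums] at ih ⊢; omega
    · by_cases hw : t = "wild"
      · subst hw; simp [pvNums] at ih ⊢; omega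
      · simp [pvNums, ht, hw] at ih ⊢; omega

-- B's wild tally is the wild count
theorem wild_fold (hand : List (String × Int × String)) (a : Int) :
    hand.foldl pvWildStep a = a + (hand.countP (fun x => x.1 == "wild") : Int) := by
  induction hand generalizing a with
  | nil => simp
  | cons x xs ih =>
    by_cases hw : x.1 = "wild"
    · rw [List.foldl_cons, show pvWildStep a x = a + 1 by simp [pvWildStep, hw], ih]
      simp [hw]; ring
    · rw [List.foldl_cons, show pvWildStep a x = a by simp [pvWildStep, hw], ih]
      simp [hw]

-- ===== VERDICT (by name: the statement is the Claim_ definition above) =====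
theorem hand_counts_spec : Claim_equal_hand_counts := by
  intro hand _
  show hand_counts hand = hand_counts_alt hand
  simp only [hand_counts, hand_counts_alt, hand_counts_fold, wild_fold,
    PySem.Dict.counter_eq_foldl, countP_partition]
  ring_nf
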